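-- pv_equiv track=rewrite | github.com/HarshithaR08/FAQ_Chatbot | rag/chunker.py | clean_catalog_text
-- ===== SOURCE A (Python) =====
-- def clean_catalog_text(text: str) -> str:
--     """
--     Catalog-specific cleanup:
--     - remove left sidebar / chrome lines
--     - collapse obvious header noise like repeated "Course List / Code / Title / Credits"
--     - drop repeated section headings inside the same block
--     - squash consecutive duplicate lines
--     """
--     lines = text.splitlines()
--     cleaned = []
--
--     SIDEBAR_NOISE_PHRASES = [
--         "montclair state university",
--         "university catalog",
--         "search catalog",
--         "catalog a-z index",
--         "courses a-z",
--         "programs a-z",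
--         "archives",
--         "faculty and administration",
--         "general information",
--         "undergraduate and graduate degree requirements",
--         "print/download options",
--         "print this page",
--         "download page (pdf)",
--         "what can we help you find?",
--         "view all results",
--         "university twitter",
--         "university facebook",
--         "university youtube",
--     ]
--
--     ONE_PER_CHUNK_HEADINGS = {
--         "program requirements",
--         "required courses",
--         "required core courses",
--         "elective courses",
--         "electives",
--         "culminating experience",
--         "total credits",
--         "course list",
--     }
--     seen_headings = set()
--
--     last_line = None
--     for raw in lines:
--         line = raw.strip()
--         if not line:
--             continue
--
--         lower = line.lower()
--
--         # 1) Kill sidebar / navigation noise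
--         if any(p in lower for p in SIDEBAR_NOISE_PHRASES):
--             continue
--
--         # 2) Normalize / collapse the "Course List Code Title Credits" header noise
--         if "course list" in lower and "code" in lower and "title" in lower and "credits" in lower:
--             line = "Course List"
--             lower = line.lower()
--
--         # 3) Only keep one copy of common section headings per chunk
--         if lower in ONE_PER_CHUNK_HEADINGS:
--             if lower in seen_headings:
--                 continue
--             seen_headings.add(lower)
--
--         # 4) Squash exact consecutive duplicates
--         if last_line is not None and line == last_line:
--             continue
--
--         cleaned.append(line)
--         last_line = line
--
--     return "\n".join(cleaned)
-- ===== SOURCE B (Python) =====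
-- # Stateless re-implementation: instead of A's single loop threading (cleaned, seen_headings,
-- # last_line) state, B expresses each step as a position-based query over immutable lists:
-- # a heading line survives iff its lowercase does not occur among the earlier lowers
-- # (first-occurrence test), and a line survives the squash iff it differs from its
-- # predecessor (zip with the shifted list). No accumulator state anywhere.
--
-- SIDEBAR_NOISE_PHRASES = [
--     "montclair state university",
--     "university catalog",
--     "search catalog",
--     "catalog a-z index",
--     "courses a-z",
--     "programs a-z",
--     "archives",
--     "faculty and administration",
--     "general information",
--     "undergraduate and graduate degree requirements",
--     "print/download options",
--     "print this page",
--     "download page (pdf)",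
--     "what can we help you find?",
--     "view all results",
--     "university twitter",
--     "university facebook",
--     "university youtube",
-- ]
--
-- ONE_PER_CHUNK_HEADINGS = {
--     "program requirements",
--     "required courses",
--     "required core courses",
--     "elective courses",
--     "electives",
--     "culminating experience",
--     "total credits",
--     "course list",
-- }
--
--
-- def _keep(line):
--     if not line:
--         return False
--     lower = line.lower()
--     return not any(p in lower for p in SIDEBAR_NOISE_PHRASES)
--
--
-- def _normalize(line):
--     lower = line.lower()
--     if "course list" in lower and "code" in lower and "title" in lower and "credits" in lower:
--         return "Course List"
--     return line
--
--
-- def clean_catalog_text(text: str) -> str: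
--     stripped = [raw.strip() for raw in text.splitlines()]
--     kept = [_normalize(line) for line in stripped if _keep(line)]
--     lowers = [line.lower() for line in kept]
--     # a common section heading survives only at its first occurrence
--     deduped = [line for i, line in enumerate(kept)
--                if line.lower() not in ONE_PER_CHUNK_HEADINGS
--                or line.lower() not in lowers[:i]]
--     # squash consecutive duplicates: compare each line with its predecessor
--     squashed = [line for prev, line in zip([None] + deduped, deduped) if prev != line]
--     return "\n".join(squashed)
-- ===== Notes on version B (the rewrite author's own statement) =====
-- stated objective: alternative
-- what changed: Replaced A's stateful loop threading (cleaned, seen_headings, last_line) accumulators by stateless position-based queries: heading dedup keeps a line iff its lowercase is absent from the prefix of earlier lowers (first-occurrence test), and the duplicate squash keeps a line iff it differs from its predecessor obtained by zipping the list with its shift.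
import Mathlib
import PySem

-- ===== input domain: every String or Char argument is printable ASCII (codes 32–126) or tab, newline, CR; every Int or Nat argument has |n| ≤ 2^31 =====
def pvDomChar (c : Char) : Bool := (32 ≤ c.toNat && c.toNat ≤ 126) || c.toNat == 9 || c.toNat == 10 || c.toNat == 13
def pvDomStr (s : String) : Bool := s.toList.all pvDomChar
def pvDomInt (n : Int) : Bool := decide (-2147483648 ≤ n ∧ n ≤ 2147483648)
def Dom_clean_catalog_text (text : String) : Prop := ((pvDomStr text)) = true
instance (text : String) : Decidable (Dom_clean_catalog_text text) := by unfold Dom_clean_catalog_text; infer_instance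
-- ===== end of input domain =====

-- B replaces A's stateful single loop (cleaned / seen_headings / last_line accumulators) by
-- stateless position-based queries: heading-dedup = first-occurrence test against the prefix
-- of earlier lowercased lines, squash = comparison with the predecessor obtained by zipping
-- the list with its shift. Same asymptotic cost; different decomposition.

-- shared text constants (the same literals appear in both Pythons)
def pvNoisePhrases : List String := [
  "montclair state university",
  "university catalog",
  "search catalog",
  "catalog a-z index",
  "courses a-z",
  "programs a-z",
  "archives",
  "faculty and administration",
  "general information",
  "undergraduate and graduate degree requirements",
  "print/download options",
  "print this page",
  "download page (pdf)",
  "what can we help you find?",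
  "view all results",
  "university twitter",
  "university facebook",
  "university youtube"]

def pvHeadings : PySem.Set String := PySem.Set.ofList [
  "program requirements",
  "required courses",
  "required core courses",
  "elective courses",
  "electives",
  "culminating experience",
  "total credits",
  "course list"]

-- ===== PORT A =====
-- one loop step of A's for-loop; state = (cleaned, seen_headings, last_line)
def pvStepA : List String × PySem.Set String × Option String → String →
    List String × PySem.Set String × Option String
  | (cleaned, seen, last), raw =>
    let line := PySem.Str.strip raw
    if line = "" then (cleaned, seen, last)
    else
      let lower := PySem.Str.lower line
      if pvNoisePhrases.any (fun p => PySem.Str.isIn p lower) then (cleaned, seen, last)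
      else
        -- normalize the "Course List Code Title Credits" header noise
        let nl :=
          if PySem.Str.isIn "course list" lower && PySem.Str.isIn "code" lower &&
             PySem.Str.isIn "title" lower && PySem.Str.isIn "credits" lower then
            ("Course List", PySem.Str.lower "Course List")
          else (line, lower)
        let line := nl.1
        let lower := nl.2
        -- heading already seen in this chunk: continue
        if PySem.Set.contains pvHeadings lower && PySem.Set.contains seen lower then
          (cleaned, seen, last)
        else
          let seen := if PySem.Set.contains pvHeadings lower then PySem.Set.add seen lower else seen
          -- squash exact consecutive duplicates
          if last = some line then (cleaned, seen, last)
          else (cleaned ++ [line], seen, some line)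

def clean_catalog_text (text : String) : String :=
  let st := (PySem.Str.splitlines text).foldl pvStepA ([], PySem.Set.empty, none)
  PySem.Str.join "\n" st.1

-- ===== PORT B =====
def pvKeep (line : String) : Bool :=
  if line = "" then false
  else !(pvNoisePhrases.any (fun p => PySem.Str.isIn p (PySem.Str.lower line)))

def pvNormalize (line : String) : String :=
  let lower := PySem.Str.lower line
  if PySem.Str.isIn "course list" lower && PySem.Str.isIn "code" lower &&
     PySem.Str.isIn "title" lower && PySem.Str.isIn "credits" lower then "Course List"
  else line

def clean_catalog_text_alt (text : String) : String :=
  let stripped := (PySem.Str.splitlines text).map PySem.Str.strip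
  let kept := (stripped.filter pvKeep).map pvNormalize
  let lowers := kept.map PySem.Str.lower
  -- a heading survives only at its first occurrence: its lower is not among lowers[:i]
  let deduped := ((PySem.List.enumerate kept 0).filter (fun p =>
      !(PySem.Set.contains pvHeadings (PySem.Str.lower p.2)) ||
      !((PySem.List.slice lowers none (some p.1)).contains (PySem.Str.lower p.2)))).map Prod.snd
  -- squash: zip each line with its predecessor (None before the first line)
  let squashed := ((List.zip (none :: deduped.map some) deduped).filter
      (fun p => decide (p.1 ≠ some p.2))).map Prod.snd
  PySem.Str.join "\n" squashed

-- ===== PRECONDITION & SPEC =====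
def Spec_clean_catalog_text (text : String) (out : String) : Prop := out = clean_catalog_text_alt text
instance (text : String) (out : String) : Decidable (Spec_clean_catalog_text text out) := by unfold Spec_clean_catalog_text; infer_instance

-- ===== CLAIM (what is proved, stated in full; the proofs are below) =====
def Claim_equal_clean_catalog_text : Prop := ∀ (text : String), Dom_clean_catalog_text text → Spec_clean_catalog_text text (clean_catalog_text text)

-- ===== LEMMAS AND PROOFS =====

-- proof-side recursive descriptions of A's heading-dedup and squash phases
def pvHd : List String → PySem.Set String → PySem.Set String × List String
  | [], seen => (seen, [])
  | l :: rest, seen =>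
    let lower := PySem.Str.lower l
    if PySem.Set.contains pvHeadings lower then
      if PySem.Set.contains seen lower then pvHd rest seen
      else
        let r := pvHd rest (PySem.Set.add seen lower)
        (r.1, l :: r.2)
    else
      let r := pvHd rest seen
      (r.1, l :: r.2)

def pvSq : List String → Option String → Option String × List String
  | [], prev => (prev, [])
  | l :: rest, prev =>
    if prev = some l then pvSq rest prev
    else
      let r := pvSq rest (some l)
      (r.1, l :: r.2)

-- A's loop step on an already stripped, kept, normalized line
def pvStepCD (st : List String × PySem.Set String × Option String) (line : String) :
    List String × PySem.Set String × Option String :=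
  let lower := PySem.Str.lower line
  if PySem.Set.contains pvHeadings lower && PySem.Set.contains st.2.1 lower then st
  else
    let seen := if PySem.Set.contains pvHeadings lower then PySem.Set.add st.2.1 lower else st.2.1
    if st.2.2 = some line then (st.1, seen, st.2.2)
    else (st.1 ++ [line], seen, some line)

theorem pvStepA_eq (st : List String × PySem.Set String × Option String) (raw : String) :
    pvStepA st raw =
      if pvKeep (PySem.Str.strip raw) then pvStepCD st (pvNormalize (PySem.Str.strip raw)) else st := by
  obtain ⟨cleaned, seen, last⟩ := st
  have hCL : PySem.Str.lower "Course List" = "course list" := by decide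
  simp only [pvStepA, pvKeep, pvNormalize]
  by_cases h0 : PySem.Str.strip raw = ""
  · simp [h0]
  · by_cases hn : ∃ x ∈ pvNoisePhrases,
        PySem.Chars.isIn x.toList (PySem.Chars.lower (PySem.Chars.strip raw.toList)) = true
    · simp [h0, hn]
    · by_cases hc : ((PySem.Chars.isIn ['c', 'o', 'u', 'r', 's', 'e', ' ', 'l', 'i', 's', 't'] (PySem.Chars.lower (PySem.Chars.strip raw.toList)) = true ∧
          PySem.Chars.isIn ['c', 'o', 'd', 'e'] (PySem.Chars.lower (PySem.Chars.strip raw.toList)) = true) ∧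
          PySem.Chars.isIn ['t', 'i', 't', 'l', 'e'] (PySem.Chars.lower (PySem.Chars.strip raw.toList)) = true) ∧
          PySem.Chars.isIn ['c', 'r', 'e', 'd', 'i', 't', 's'] (PySem.Chars.lower (PySem.Chars.strip raw.toList)) = true
      · simp [h0, hn, hc, pvStepCD, hCL]
      · simp [h0, hn, hc, pvStepCD]

theorem pvStepCD_fold (ls : List String) (acc : List String) (seen : PySem.Set String)
    (last : Option String) :
    ls.foldl pvStepCD (acc, seen, last) =
      (acc ++ (pvSq (pvHd ls seen).2 last).2, (pvHd ls seen).1, (pvSq (pvHd ls seen).2 last).1) := by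
  induction ls generalizing acc seen last with
  | nil => simp [pvHd, pvSq]
  | cons l rest ih =>
    simp only [List.foldl_cons, pvStepCD, pvHd]
    by_cases h1 : PySem.Str.lower l ∈ pvHeadings
    · by_cases h2 : PySem.Str.lower l ∈ seen
      · simp [h1, h2, ih]
      · by_cases h3 : last = some l
        · simp [h1, h2, h3, ih, pvSq]
        · simp [h1, h2, h3, ih, pvSq]
    · by_cases h3 : last = some l
      · simp [h1, h3, ih, pvSq]
      · simp [h1, h3, ih, pvSq]

-- stateless middle form: heading-dedup expressed against the list of earlier lowers
def pvG : List String → List String → List String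
  | [], _ => []
  | l :: rest, pr =>
    let lo := PySem.Str.lower l
    if PySem.Set.contains pvHeadings lo = true ∧ lo ∈ pr then pvG rest (pr ++ [lo])
    else l :: pvG rest (pr ++ [lo])

-- A's seen-set dedup equals the prefix-membership dedup when seen holds exactly the heading lowers of pr
theorem pvHd_eq_G (ls : List String) (seen : PySem.Set String) (pr : List String)
    (hinv : ∀ x, x ∈ pvHeadings → (x ∈ seen ↔ x ∈ pr)) :
    (pvHd ls seen).2 = pvG ls pr := by
  induction ls generalizing seen pr with
  | nil => simp [pvHd, pvG]
  | cons l rest ih =>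
    simp only [pvHd, pvG]
    by_cases h1 : PySem.Str.lower l ∈ pvHeadings
    · by_cases h2 : PySem.Str.lower l ∈ pr
      · have hs : PySem.Str.lower l ∈ seen := (hinv _ h1).2 h2
        have ih' := ih seen (pr ++ [PySem.Str.lower l]) (fun x hx => by
          rw [hinv x hx]
          constructor
          · intro h; exact List.mem_append_left _ h
          · intro h
            rcases List.mem_append.1 h with h | h
            · exact h
            · simp at h; rw [h]; exact h2)
        simp [h1, h2, hs, ih']
      · have hs : PySem.Str.lower l ∉ seen := fun h => h2 ((hinv _ h1).1 h)
        have ih' := ih (PySem.Set.add seen (PySem.Str.lower l)) (pr ++ [PySem.Str.lower l])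
          (fun x hx => by
            rw [PySem.Set.mem_add, List.mem_append, hinv x hx]
            simp)
        simp only [PySem.Set.add, PySem.Set.contains_eq_listContains, List.contains_eq_mem,
          hs, decide_false, Bool.false_eq_true, if_false] at ih'
        simp [h1, h2, hs, ih']
    · have ih' := ih seen (pr ++ [PySem.Str.lower l]) (fun x hx => by
        have hne : x ≠ PySem.Str.lower l := fun h => h1 (h ▸ hx)
        rw [hinv x hx, List.mem_append]
        simp [hne])
      simp [h1, ih']

-- squash expressed as zip-with-predecessor
theorem pvSq_eq_zip (ls : List String) (prev : Option String) :
    (pvSq ls prev).2 =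
      ((List.zip (prev :: ls.map some) ls).filter (fun p => decide (p.1 ≠ some p.2))).map Prod.snd := by
  induction ls generalizing prev with
  | nil => simp [pvSq]
  | cons l rest ih =>
    simp only [pvSq, List.map_cons, List.zip_cons_cons, List.filter_cons]
    by_cases h : prev = some l
    · simp [h, ih]
    · simp [h, ih]

-- B's enumerate/slice filter equals the prefix-membership dedup
theorem pvG_eq_enum (ls pr : List String) (s : Nat) (hs : pr.length = s) :
    ((PySem.List.enumerate ls (s : Int)).filter (fun p =>
        !(PySem.Set.contains pvHeadings (PySem.Str.lower p.2)) ||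
        !((PySem.List.slice (pr ++ ls.map PySem.Str.lower) none (some p.1)).contains
            (PySem.Str.lower p.2)))).map Prod.snd = pvG ls pr := by
  induction ls generalizing pr s with
  | nil => simp [PySem.List.enumerate_nil, pvG]
  | cons l rest ih =>
    have hlist : pr ++ (l :: rest).map PySem.Str.lower
        = (pr ++ [PySem.Str.lower l]) ++ rest.map PySem.Str.lower := by simp
    rw [PySem.List.enumerate_cons, hlist]
    have hslice : PySem.List.slice ((pr ++ [PySem.Str.lower l]) ++ rest.map PySem.Str.lower)
        none (some (s : Int)) = pr := by
      rw [PySem.List.slice_to_natCast, List.append_assoc]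
      exact List.take_left' hs
    have hcast : (s : Int) + 1 = ((s + 1 : Nat) : Int) := by push_cast; ring
    have ih' := ih (pr ++ [PySem.Str.lower l]) (s + 1) (by simp [hs])
    by_cases h1 : PySem.Str.lower l ∈ pvHeadings
    · by_cases h2 : PySem.Str.lower l ∈ pr
      · rw [List.filter_cons_of_neg (by simp only [hslice]; simp [h1, h2])]
        rw [hcast, ih']
        simp [pvG, h1, h2]
      · rw [List.filter_cons_of_pos (by simp only [hslice]; simp [h1, h2])]
        rw [List.map_cons, hcast, ih']
        simp [pvG, h1, h2]
    · rw [List.filter_cons_of_pos (by simp only [hslice]; simp [h1])]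
      rw [List.map_cons, hcast, ih']
      simp [pvG, h1]

-- ===== VERDICT (by name: the statement is the Claim_ definition above) =====
set_option maxHeartbeats 1000000 in
theorem clean_catalog_text_spec : Claim_equal_clean_catalog_text := by
  intro text _
  unfold Spec_clean_catalog_text clean_catalog_text clean_catalog_text_alt
  have h1 : (PySem.Str.splitlines text).foldl pvStepA ([], PySem.Set.empty, none)
      = (PySem.Str.splitlines text).foldl
          (fun st raw => if pvKeep (PySem.Str.strip raw) then pvStepCD st (pvNormalize (PySem.Str.strip raw)) else st)
          ([], PySem.Set.empty, none) :=
    PySem.List.foldl_congr_mem _ _ _ _ (fun acc x _ => pvStepA_eq acc x)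
  rw [h1, PySem.List.foldl_if_eq_foldl_filter, ← List.foldl_map, pvStepCD_fold]
  simp only [List.nil_append]
  have hkept : (((PySem.Str.splitlines text).map PySem.Str.strip).filter pvKeep).map pvNormalize
      = ((PySem.Str.splitlines text).filter (fun raw => pvKeep (PySem.Str.strip raw))).map
          (fun raw => pvNormalize (PySem.Str.strip raw)) := by
    rw [List.filter_map, List.map_map]; simp only [Function.comp_def]
  rw [hkept]
  have hded := pvG_eq_enum (((PySem.Str.splitlines text).filter
      (fun raw => pvKeep (PySem.Str.strip raw))).map
      (fun raw => pvNormalize (PySem.Str.strip raw))) [] 0 rfl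
  simp only [List.nil_append, Nat.cast_zero] at hded
  rw [hded, ← pvHd_eq_G _ PySem.Set.empty [] (by simp [PySem.Set.empty]), pvSq_eq_zip]
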